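-- pv_equiv track=rewrite | github.com/mcmathews/DailyProgrammer | HeighwayDragonFractal/HeighwayDragonFractal.py | calcTurns
-- ===== SOURCE A (Python) =====
-- def calcTurns(n):
-- 	numTurns = (2 ** n) - 1
-- 	turns = [0] * numTurns
--
-- 	step = 2
-- 	start = 0
-- 	while start < numTurns:
-- 		i = start
-- 		even = False
-- 		while i < numTurns:
-- 			turns[i] = 1 if even else -1
-- 			even = not even
--
-- 			i += step
-- 		step *= 2
-- 		start = start * 2 + 1
--
-- 	return turns
-- ===== SOURCE B (Python) =====
-- def calcTurns(n):
-- 	numTurns = (2 ** n) - 1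
-- 	turns = []
-- 	for i in range(numTurns):
-- 		k = i + 1
-- 		while k % 2 == 0:
-- 			k //= 2
-- 		turns.append(1 if k % 4 == 3 else -1)
-- 	return turns
-- ===== Notes on version B (the rewrite author's own statement) =====
-- stated objective: alternative
-- what changed: Replaces the level-by-level doubling fill (outer loop over levels, inner loop striding through the array with alternating signs) by a single pass that computes each turn directly from its index: strip the factors of 2 from i+1 and test the odd remainder mod 4.
-- outside the precondition, e.g. on calcTurns(-2): A raises TypeError, B raises TypeError; on calcTurns(64): A raises OverflowError, B does not finish within the time limit
import Mathlib
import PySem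

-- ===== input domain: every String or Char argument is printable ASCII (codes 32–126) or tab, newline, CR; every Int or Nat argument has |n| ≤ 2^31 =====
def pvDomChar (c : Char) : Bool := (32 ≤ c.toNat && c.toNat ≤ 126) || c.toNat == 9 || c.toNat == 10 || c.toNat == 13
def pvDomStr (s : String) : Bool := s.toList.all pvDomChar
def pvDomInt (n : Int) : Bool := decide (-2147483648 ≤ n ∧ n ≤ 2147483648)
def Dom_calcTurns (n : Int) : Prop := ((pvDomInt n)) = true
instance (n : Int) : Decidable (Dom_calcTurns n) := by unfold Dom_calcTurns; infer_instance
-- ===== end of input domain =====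

-- B replaces A's level-by-level strided filling by a one-pass per-index closed form (strip factors of 2
-- from i+1, test the odd part mod 4); objective: alternative (same asymptotic cost).

-- ===== PORT A =====
-- turns[i] = v ; indices A reaches are always in range (the out-of-range branch is never taken)
def pySetA (xs : List Int) (i : Int) (v : Int) : List Int :=
  if 0 ≤ i ∧ i.toNat < xs.length then xs.set i.toNat v else xs

-- inner 'while i < numTurns' loop of A; '0 < stp' is a totality guard only (A's step is always ≥ 2)
def innerA (numTurns stp i : Int) (even : Bool) (turns : List Int) : List Int :=
  if _h : i < numTurns ∧ 0 < stp then
    innerA numTurns stp (i + stp) (!even) (pySetA turns i (if even then 1 else -1))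
  else turns
termination_by (numTurns - i).toNat
decreasing_by omega

-- outer 'while start < numTurns' loop of A; '0 ≤ start' is a totality guard only (A's start is always ≥ 0)
def outerA (numTurns stp start : Int) (turns : List Int) : List Int :=
  if _h : start < numTurns ∧ 0 ≤ start then
    outerA numTurns (stp * 2) (start * 2 + 1) (innerA numTurns stp start false turns)
  else turns
termination_by (numTurns - start).toNat
decreasing_by omega

def calcTurns (n : Int) : List Int :=
  let numTurns : Int := 2 ^ n.toNat - 1
  let turns : List Int := List.replicate numTurns.toNat 0
  outerA numTurns 2 0 turns

-- ===== PORT B =====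
-- 'while k % 2 == 0: k //= 2'; '0 < k' is a totality guard only (B's k = i+1 is always ≥ 1)
def stripTwos (k : Nat) : Nat :=
  if 0 < k ∧ k % 2 = 0 then stripTwos (k / 2) else k
termination_by k
decreasing_by omega

def calcTurns_alt (n : Int) : List Int :=
  let numTurns : Int := 2 ^ n.toNat - 1
  (List.range numTurns.toNat).map (fun i =>
    if stripTwos (i + 1) % 4 = 3 then (1 : Int) else -1)

-- ===== PRECONDITION & SPEC =====
-- Pre_ excludes exactly the inputs on which A raises: n < 0, where Python's 2 ** n is a float and
-- [0] * numTurns (in A) / range(numTurns) (in B) raise TypeError, and n >= 64, where numTurns = 2^n - 1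
-- exceeds sys.maxsize so A's [0] * numTurns raises OverflowError (B's range loop does not finish there).
def Pre_calcTurns (n : Int) : Prop := 0 ≤ n ∧ n ≤ 63
instance (n : Int) : Decidable (Pre_calcTurns n) := by unfold Pre_calcTurns; infer_instance
def pvWitness_calcTurns : Int := (3)

def Spec_calcTurns (n : Int) (out : List Int) : Prop := out = calcTurns_alt n
instance (n : Int) (out : List Int) : Decidable (Spec_calcTurns n out) := by unfold Spec_calcTurns; infer_instance

-- ===== CLAIM (what is proved, stated in full; the proofs are below) =====
def Claim_equal_calcTurns : Prop := ∀ (n : Int), Dom_calcTurns n → Pre_calcTurns n → Spec_calcTurns n (calcTurns n)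

-- ===== LEMMAS AND PROOFS =====

-- the per-index value B computes
def fTurn (p : Nat) : Int := if stripTwos (p + 1) % 4 = 3 then 1 else -1

-- the value A's inner loop writes at stride offset m when the alternation flag started as ev
def valF (ev : Bool) (m : Int) : Int :=
  if m % 2 = 0 then (if ev then 1 else -1) else (if ev then -1 else 1)

lemma valF_flip (ev : Bool) (m : Int) : valF (!ev) (m - 1) = valF ev m := by
  cases ev <;> simp only [valF, Bool.not_true, Bool.not_false] <;> split_ifs <;> first | rfl | omega

lemma stripTwos_odd (m : Nat) : stripTwos (2 * m + 1) = 2 * m + 1 := by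
  rw [stripTwos]
  have h : (2 * m + 1) % 2 = 1 := by omega
  simp [h]

lemma stripTwos_pow (j m : Nat) : stripTwos (2 ^ j * (2 * m + 1)) = 2 * m + 1 := by
  induction j with
  | zero => simpa using stripTwos_odd m
  | succ j ih =>
    rw [stripTwos]
    have h1 : 0 < 2 ^ (j + 1) * (2 * m + 1) := by positivity
    have h2 : 2 ^ (j + 1) * (2 * m + 1) = 2 * (2 ^ j * (2 * m + 1)) := by ring
    have h3 : 2 ^ (j + 1) * (2 * m + 1) % 2 = 0 := by omega
    have h4 : 2 ^ (j + 1) * (2 * m + 1) / 2 = 2 ^ j * (2 * m + 1) := by omega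
    simp [h1, h3, h4, ih]

lemma pySetA_length (xs : List Int) (i v : Int) : (pySetA xs i v).length = xs.length := by
  unfold pySetA; split <;> simp

lemma pySetA_get (xs : List Int) (i v : Int) (p : Nat) :
    (pySetA xs i v)[p]? = if i = (p : Int) ∧ p < xs.length then some v else xs[p]? := by
  unfold pySetA
  split_ifs with h1 h2 h2
  · rcases h2 with ⟨h2, h3⟩
    have : i.toNat = p := by omega
    simp [this, h3]
  · rcases h1 with ⟨h1a, h1b⟩
    rw [List.getElem?_set]
    have : ¬ i.toNat = p := by omega
    simp [this]
  · omega
  · rfl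

lemma innerA_length (T stp i : Int) (ev : Bool) (turns : List Int) :
    (innerA T stp i ev turns).length = turns.length := by
  induction i, ev, turns using innerA.induct (numTurns := T) (stp := stp) with
  | case1 i ev turns h ih =>
    simp only [dite_eq_ite] at ih
    rw [innerA]; simp [h, ih, pySetA_length]
  | case2 i ev turns h => rw [innerA]; simp [h]

lemma outerA_length (T stp start : Int) (turns : List Int) :
    (outerA T stp start turns).length = turns.length := by
  induction stp, start, turns using outerA.induct (numTurns := T) with
  | case1 stp start turns h ih => rw [outerA]; simp [h, ih, innerA_length]
  | case2 stp start turns h => rw [outerA]; simp [h]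

lemma inner_get (T stp : Int) (hstp : 0 < stp) (p : Nat) :
    ∀ (i : Int) (ev : Bool) (turns : List Int), (T : Int) ≤ turns.length →
      (innerA T stp i ev turns)[p]? =
        if i ≤ (p : Int) ∧ ((p : Int) - i) % stp = 0 ∧ (p : Int) < T then
          some (valF ev (((p : Int) - i) / stp))
        else turns[p]? := by
  intro i ev turns
  induction i, ev, turns using innerA.induct (numTurns := T) (stp := stp) with
  | case1 i ev turns h ih =>
    intro hlen
    simp only [dite_eq_ite] at ih
    rw [innerA, dif_pos h]
    rw [ih (by rw [pySetA_length]; exact hlen)]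
    by_cases hC : i ≤ (p : Int) ∧ ((p : Int) - i) % stp = 0 ∧ (p : Int) < T
    · rw [if_pos hC]
      obtain ⟨hC1, hC2, hC3⟩ := hC
      by_cases hpi : (p : Int) = i
      · have hc1 : ¬ (i + stp ≤ (p : Int) ∧ ((p : Int) - (i + stp)) % stp = 0 ∧ (p : Int) < T) := by
          rintro ⟨a, -, -⟩; omega
        rw [if_neg hc1, pySetA_get, if_pos ⟨hpi.symm, by omega⟩]
        have h0 : ((p : Int) - i) / stp = 0 := by rw [hpi]; simp
        rw [h0]
        cases ev <;> simp [valF]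
      · have hdvd : stp ∣ ((p : Int) - i) := Int.dvd_of_emod_eq_zero hC2
        obtain ⟨m, hm⟩ := hdvd
        have hm1 : 1 ≤ m := by
          by_contra hcon
          have : stp * m ≤ 0 := mul_nonpos_iff.mpr (Or.inl ⟨by omega, by omega⟩)
          omega
        have hge : i + stp ≤ (p : Int) := by
          have : stp * 1 ≤ stp * m := by
            apply mul_le_mul_of_nonneg_left hm1 (by omega)
          omega
        have hsub : (p : Int) - (i + stp) = stp * (m - 1) := by
          have hr : stp * (m - 1) = stp * m - stp := by ring
          omega
        have hc1 : i + stp ≤ (p : Int) ∧ ((p : Int) - (i + stp)) % stp = 0 ∧ (p : Int) < T := by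
          refine ⟨hge, ?_, hC3⟩
          rw [hsub]; exact Int.mul_emod_right _ _
        rw [if_pos hc1]
        congr 1
        have e1 : ((p : Int) - (i + stp)) / stp = m - 1 := by
          rw [hsub, Int.mul_ediv_cancel_left _ (by omega)]
        have e2 : ((p : Int) - i) / stp = m := by
          rw [hm, Int.mul_ediv_cancel_left _ (by omega)]
        rw [e1, e2]
        exact valF_flip ev m
    · rw [if_neg hC]
      have hc1 : ¬ (i + stp ≤ (p : Int) ∧ ((p : Int) - (i + stp)) % stp = 0 ∧ (p : Int) < T) := by
        rintro ⟨a, b, c⟩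
        apply hC
        refine ⟨by omega, ?_, c⟩
        have e : (p : Int) - i = ((p : Int) - (i + stp)) + stp * 1 := by ring
        rw [e, Int.add_mul_emod_self_left]
        exact b
      rw [if_neg hc1, pySetA_get]
      have hne : ¬ (i = (p : Int) ∧ p < turns.length) := by
        rintro ⟨e, -⟩
        exact hC ⟨by omega, by simp [← e], by omega⟩
      rw [if_neg hne]
  | case2 i ev turns h =>
    intro hlen
    rw [innerA, dif_neg h]
    have hTi : T ≤ i := by
      by_contra hcon
      exact h ⟨by omega, hstp⟩
    have : ¬ (i ≤ (p : Int) ∧ ((p : Int) - i) % stp = 0 ∧ (p : Int) < T) := by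
      rintro ⟨a, -, c⟩; omega
    rw [if_neg this]

-- casts of powers of two
lemma castPow (j : Nat) : ((2 ^ j : Nat) : Int) = (2 : Int) ^ j := by push_cast; ring

-- k % (2P) is k % P or k % P + P
lemma mod_two_mul_cases (k P : Nat) (hP : 0 < P) :
    k % (2 * P) = k % P ∨ k % (2 * P) = k % P + P := by
  have h1 : k % (2 * P) < 2 * P := Nat.mod_lt _ (by omega)
  have h2 : k % (2 * P) % P = k % P := Nat.mod_mod_of_dvd k ⟨2, by ring⟩
  by_cases hx : k % (2 * P) < P
  · left; rw [← h2, Nat.mod_eq_of_lt hx]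
  · right
    have hx' : P ≤ k % (2 * P) := by omega
    have h3 : k % (2 * P) % P = k % (2 * P) - P := by
      rw [Nat.mod_eq_sub_mod hx', Nat.mod_eq_of_lt (by omega)]
    omega

-- invariant maintenance: one inner pass at level j updates the residue condition from 2^j to 2^(j+1)
lemma inner_invariant (N : Nat) (j : Nat) (turns : List Int) (hlen : turns.length = N)
    (hinv : ∀ q, q < N → turns[q]? = some (if (q + 1) % 2 ^ j = 0 then 0 else fTurn q)) :
    ∀ q, q < N →
      (innerA (N : Int) ((2 : Int) ^ (j + 1)) ((2 : Int) ^ j - 1) false turns)[q]? =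
        some (if (q + 1) % 2 ^ (j + 1) = 0 then 0 else fTurn q) := by
  intro q hq
  set P : Nat := 2 ^ j with hPdef
  have hP : 0 < P := Nat.two_pow_pos j
  have hcP : ((P : Nat) : Int) = (2 : Int) ^ j := castPow j
  have hc2P : ((2 * P : Nat) : Int) = (2 : Int) ^ (j + 1) := by
    rw [Nat.cast_mul, hcP]; push_cast; ring
  have hmod2 : (q + 1) % 2 ^ (j + 1) = (q + 1) % (2 * P) := by rw [hPdef]; ring_nf
  rw [inner_get (N : Int) ((2 : Int) ^ (j + 1)) (by positivity) q _ false turns (by omega)]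
  set k : Nat := q + 1 with hk
  by_cases hK : k % (2 * P) = P
  · -- this pass writes position q; the value is fTurn q and the new residue is nonzero
    have hkP : P ≤ k := by
      by_contra hcon
      rw [Nat.mod_eq_of_lt (by omega)] at hK
      omega
    set m : Nat := k / (2 * P) with hm
    have hdm : 2 * P * m + P = k := by
      have hdam := Nat.div_add_mod k (2 * P)
      rw [← hm, hK] at hdam
      exact hdam
    have hCond : ((2 : Int) ^ j - 1 ≤ (q : Int) ∧
        ((q : Int) - ((2 : Int) ^ j - 1)) % (2 : Int) ^ (j + 1) = 0 ∧ (q : Int) < (N : Int)) := by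
      refine ⟨by omega, ?_, by omega⟩
      have hdmZ : 2 * (P : Int) * (m : Int) + (P : Int) = (k : Int) := by
        exact_mod_cast congrArg (fun x : Nat => (x : Int)) hdm
      have e : (q : Int) - ((2 : Int) ^ j - 1) = 2 * (P : Int) * (m : Int) := by
        rw [← hcP]; omega
      rw [e, ← hc2P]
      push_cast
      exact Int.mul_emod_right _ _
    rw [if_pos hCond]
    have ediv : ((q : Int) - ((2 : Int) ^ j - 1)) / (2 : Int) ^ (j + 1) = (m : Int) := by
      have hdmZ : 2 * (P : Int) * (m : Int) + (P : Int) = (k : Int) := by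
        exact_mod_cast congrArg (fun x : Nat => (x : Int)) hdm
      have e : (q : Int) - ((2 : Int) ^ j - 1) = ((2 * P : Nat) : Int) * ((m : Nat) : Int) := by
        push_cast; omega
      rw [e, hc2P, Int.mul_ediv_cancel_left _ (by positivity)]
    rw [ediv]
    have hRne : k % 2 ^ (j + 1) ≠ 0 := by rw [hmod2]; omega
    rw [if_neg hRne]
    have hks : k = P * (2 * m + 1) := by rw [← hdm]; ring
    have hstrip : stripTwos k = 2 * m + 1 := by
      rw [hks, hPdef]; exact stripTwos_pow j m
    unfold fTurn valF
    rw [hstrip]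
    by_cases hm2 : m % 2 = 0
    · rw [if_pos (show (m : Int) % 2 = 0 by omega),
        if_neg (show ¬ (2 * m + 1) % 4 = 3 by omega)]
      norm_num
    · rw [if_neg (show ¬ (m : Int) % 2 = 0 by omega),
        if_pos (show (2 * m + 1) % 4 = 3 by omega)]
      norm_num
  · -- untouched by this pass; old invariant carries over, residues mod 2^j and 2^(j+1) agree on zero
    have hCond : ¬ ((2 : Int) ^ j - 1 ≤ (q : Int) ∧
        ((q : Int) - ((2 : Int) ^ j - 1)) % (2 : Int) ^ (j + 1) = 0 ∧ (q : Int) < (N : Int)) := by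
      rintro ⟨a, b, -⟩
      have hkP : P ≤ k := by omega
      have e : (q : Int) - ((2 : Int) ^ j - 1) = ((k - P : Nat) : Int) := by
        rw [← hcP]; omega
      rw [e, ← hc2P] at b
      rw [← Int.natCast_emod] at b
      have hb : (k - P) % (2 * P) = 0 := by exact_mod_cast b
      apply hK
      have e2 : k = (k - P) + P := by omega
      rw [e2, Nat.add_mod, hb, Nat.zero_add, Nat.mod_mod]
      exact Nat.mod_eq_of_lt (by omega)
    rw [if_neg hCond, hinv q hq, hmod2, ← hk]
    have hcases := mod_two_mul_cases k P hP
    have hlt : k % P < P := Nat.mod_lt _ hP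
    by_cases hz : k % P = 0
    · have : k % (2 * P) = 0 := by omega
      simp [hz, this]
    · have : k % (2 * P) ≠ 0 := by omega
      simp [hz, this]

lemma outer_correct (N : Nat) (p : Nat) (hp : p < N) :
    ∀ (stp start : Int) (turns : List Int), ∀ j : Nat,
      stp = (2 : Int) ^ (j + 1) → start = (2 : Int) ^ j - 1 → turns.length = N →
      (∀ q, q < N → turns[q]? = some (if (q + 1) % 2 ^ j = 0 then 0 else fTurn q)) →
      (outerA (N : Int) stp start turns)[p]? = some (fTurn p) := by
  intro stp start turns
  induction stp, start, turns using outerA.induct (numTurns := (N : Int)) with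
  | case1 stp start turns h ih =>
    intro j hstp hstart hlen hinv
    rw [outerA, dif_pos h]
    apply ih (j + 1)
    · rw [hstp]; ring
    · rw [hstart]; ring
    · rw [innerA_length]; exact hlen
    · subst hstp hstart
      exact inner_invariant N j turns hlen hinv
  | case2 stp start turns h =>
    intro j hstp hstart hlen hinv
    rw [outerA, dif_neg h]
    have hge : 0 ≤ start := by
      have h1 : (1 : Nat) ≤ 2 ^ j := Nat.one_le_two_pow
      have h2 := castPow j
      rw [hstart]
      omega
    have hN : (N : Int) ≤ start := by
      by_contra hcon
      exact h ⟨by omega, hge⟩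
    have hsmall : p + 1 < 2 ^ j := by
      have := castPow j
      rw [hstart] at hN
      omega
    rw [hinv p hp, Nat.mod_eq_of_lt hsmall]
    simp

-- ===== VERDICT (by name: the statement is the Claim_ definition above) =====
theorem calcTurns_spec : Claim_equal_calcTurns := by
  intro n _ _
  unfold Spec_calcTurns
  set N : Nat := 2 ^ n.toNat - 1 with hN
  have h2 : (2 : Int) ^ n.toNat - 1 = (N : Int) := by
    have h1 : (1 : Nat) ≤ 2 ^ n.toNat := Nat.one_le_two_pow
    rw [hN]
    push_cast [h1]
    ring
  have hA : calcTurns n = outerA (N : Int) 2 0 (List.replicate N 0) := by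
    show outerA ((2 : Int) ^ n.toNat - 1) 2 0
        (List.replicate ((2 : Int) ^ n.toNat - 1).toNat 0) = _
    rw [h2]
    simp
  have hB : calcTurns_alt n = (List.range N).map fTurn := by
    show (List.range ((2 : Int) ^ n.toNat - 1).toNat).map _ = _
    rw [h2]
    simp only [Int.toNat_natCast]
    rfl
  rw [hA, hB]
  apply List.ext_getElem?
  intro i
  by_cases hi : i < N
  · rw [outer_correct N i hi 2 0 (List.replicate N 0) 0 (by norm_num) (by norm_num)
      (by simp) ?_]
    · simp [hi]
    · intro q hq
      simp [hq, Nat.mod_one]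
  · have hlenA : (outerA (N : Int) 2 0 (List.replicate N 0)).length = N := by
      rw [outerA_length]; simp
    rw [List.getElem?_eq_none (by omega), List.getElem?_eq_none (by simp; omega)]
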